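-- pv_equiv track=rewrite | github.com/adamzulqar9/qa-assessment | calculator/test_helper/TestHelper.py | prepare_expected_value
-- ===== SOURCE A (Python) =====
-- def list_to_string(list_of_number):
--     """
--     Joins list to form a string
--     :param list_of_number: number list
--     :return:
--     """
--     string = ""
--     return string.join(list_of_number)
--
-- def prepare_expected_value(number, op):
--     """
--     Prepares expected value to be used for assertion, adding "space" to conform to calculator output format
--     :param number: input number
--     :param op: input operator
--     :return: processed expected value in str
--     """
--     # FIXME: workaround
--     if op == 'divide' or op == '/':
--         return number
--     else:
--         number = convert_to_list(number)
--         expected_value = []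
--         number = number[::-1]
--         for iterate, value in enumerate(number):
--             if iterate % 3 == 0 and iterate != 0:
--                 expected_value.insert(iterate, '{} '.format(value))
--             else:
--                 expected_value.insert(iterate, value)
--
--         expected_value = expected_value[::-1]
--         # TODO: implement
--         # if len(expected_value) > 9:
--         # raise NotImplementedError
--
--         return list_to_string(expected_value)
--
-- def convert_to_list(number):
--     """
--     Convert input numbers to list
--     :param number: input number
--     :return: list
--     """
--     number_list = list(number)
--     return number_list
-- ===== SOURCE B (Python) =====
-- def prepare_expected_value(number, op):
--     if op == 'divide' or op == '/':
--         return number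
--     s = number[::-1]
--     chunks = [s[i:i + 3] for i in range(0, len(s), 3)]
--     return ' '.join(chunks)[::-1]
-- ===== Notes on version B (the rewrite author's own statement) =====
-- stated objective: faster
-- what changed: Replaces the per-character enumerate loop with modulo tests and positional list.insert by slicing the reversed string into 3-character chunks and joining them with spaces in one join.
import Mathlib
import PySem

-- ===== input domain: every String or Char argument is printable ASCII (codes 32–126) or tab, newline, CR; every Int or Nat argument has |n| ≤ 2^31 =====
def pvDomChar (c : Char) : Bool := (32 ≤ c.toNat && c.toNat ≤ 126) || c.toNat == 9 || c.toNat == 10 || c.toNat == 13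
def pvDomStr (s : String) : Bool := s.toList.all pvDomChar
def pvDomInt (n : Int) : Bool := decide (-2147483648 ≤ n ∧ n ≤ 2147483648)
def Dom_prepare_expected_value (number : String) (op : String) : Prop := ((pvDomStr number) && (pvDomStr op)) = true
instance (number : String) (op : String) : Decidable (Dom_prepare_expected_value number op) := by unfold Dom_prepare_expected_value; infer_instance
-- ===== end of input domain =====

-- B replaces A's enumerate loop (modulo test + positional list.insert) by slicing the
-- reversed string into 3-character chunks and joining them with spaces; objective: faster (constant factor: one join instead of a per-character loop).

-- ===== PORT A =====
-- loop body of A's 'for iterate, value in enumerate(number): ...'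
def pvStepA (acc : List String) (iv : Int × Char) : List String :=
  if PySem.Int.mod iv.1 3 == 0 && iv.1 != 0 then
    PySem.List.insert acc iv.1 (String.ofList [iv.2, ' '])   -- '{} '.format(value)
  else
    PySem.List.insert acc iv.1 (String.ofList [iv.2])

def prepare_expected_value (number : String) (op : String) : String :=
  if op == "divide" || op == "/" then number
  else
    let numberList := number.toList                   -- convert_to_list(number)
    let rev := numberList.reverse                     -- number[::-1]
    let expected := (PySem.List.enumerate rev).foldl pvStepA []
    PySem.Str.join "" expected.reverse                -- list_to_string(expected_value[::-1])

-- ===== PORT B =====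
def prepare_expected_value_alt (number : String) (op : String) : String :=
  if op == "divide" || op == "/" then number
  else
    let s := number.toList.reverse                    -- number[::-1]
    let chunks := (PySem.List.pyRange 0 (PySem.List.len s) 3).map
      (fun i => PySem.List.slice s (some i) (some (i + 3)))   -- [s[i:i+3] for i in range(0, len(s), 3)]
    String.ofList (PySem.Chars.join [' '] chunks).reverse    -- ' '.join(chunks)[::-1]

-- ===== PRECONDITION & SPEC =====
def Spec_prepare_expected_value (number : String) (op : String) (out : String) : Prop := out = prepare_expected_value_alt number op
instance (number : String) (op : String) (out : String) : Decidable (Spec_prepare_expected_value number op out) := by unfold Spec_prepare_expected_value; infer_instance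

-- ===== CLAIM (what is proved, stated in full; the proofs are below) =====
def Claim_equal_prepare_expected_value : Prop := ∀ (number : String) (op : String), Dom_prepare_expected_value number op → Spec_prepare_expected_value number op (prepare_expected_value number op)

-- ===== LEMMAS AND PROOFS =====

-- proof-side bridge: the grouped form of the reversed string, three characters at a time
def pvGroup : List Char → List Char
  | c1 :: c2 :: c3 :: c4 :: rest => c1 :: c2 :: c3 :: ' ' :: pvGroup (c4 :: rest)
  | s => s

-- the string A's loop body appends at index i
def pvFA (iv : Int × Char) : String :=
  if PySem.Int.mod iv.1 3 == 0 && iv.1 != 0 then String.ofList [iv.2, ' ']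
  else String.ofList [iv.2]

-- the reversed character contribution of index i
def pvGB (iv : Int × Char) : List Char :=
  if PySem.Int.mod iv.1 3 == 0 && iv.1 != 0 then [' ', iv.2] else [iv.2]

lemma pvGroup_nil : pvGroup [] = [] := rfl
lemma pvGroup_one (a : Char) : pvGroup [a] = [a] := rfl
lemma pvGroup_two (a b : Char) : pvGroup [a, b] = [a, b] := rfl
lemma pvGroup_three (a b c : Char) : pvGroup [a, b, c] = [a, b, c] := rfl
lemma pvGroup_cons4 (a b c d : Char) (rest : List Char) :
    pvGroup (a :: b :: c :: d :: rest) = a :: b :: c :: ' ' :: pvGroup (d :: rest) := rfl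

lemma pvStepA_eq (acc : List String) (c : Char) :
    pvStepA acc ((acc.length : Int), c) = acc ++ [pvFA ((acc.length : Int), c)] := by
  unfold pvStepA pvFA
  split_ifs <;>
    simp [PySem.List.insert_natCast acc acc.length _ le_rfl]

lemma pvFoldl_map (l : List Char) (k : Nat) (acc : List String) (h : acc.length = k) :
    (PySem.List.enumerate l (k : Int)).foldl pvStepA acc
      = acc ++ (PySem.List.enumerate l (k : Int)).map pvFA := by
  induction l generalizing k acc with
  | nil => simp [PySem.List.enumerate_nil]
  | cons x xs ih =>
    subst h
    rw [PySem.List.enumerate_cons]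
    simp only [List.foldl_cons, List.map_cons]
    rw [pvStepA_eq]
    have hcast : ((acc.length : Int) + 1)
        = (((acc ++ [pvFA ((acc.length : Int), x)]).length : Nat) : Int) := by
      simp
    rw [hcast, ih _ _ rfl]
    simp

lemma pvFA_rev (iv : Int × Char) : (pvFA iv).toList.reverse = pvGB iv := by
  unfold pvFA pvGB
  split_ifs <;> simp

lemma pvGB_space (k : Nat) (c : Char) (h3 : k % 3 = 0) (hk : k ≠ 0) :
    pvGB ((k : Int), c) = [' ', c] := by
  have h4 : (3 : Nat) ∣ k := by omega
  simp [pvGB, hk]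
  exact_mod_cast h4

lemma pvGB_single (k : Nat) (c : Char) (h3 : k % 3 ≠ 0) :
    pvGB ((k : Int), c) = [c] := by
  simp [pvGB]
  intro hd
  have h4 : (3 : Nat) ∣ k := by exact_mod_cast hd
  omega

lemma pvGB_head (k : Nat) (c : Char) (h3 : k % 3 = 0) :
    pvGB ((k : Int), c) = if k = 0 then [c] else [' ', c] := by
  by_cases hk : k = 0
  · subst hk
    unfold pvGB
    simp
  · simp [hk, pvGB_space k c h3 hk]

lemma pvCore : ∀ (n : Nat) (r : List Char), r.length ≤ n → ∀ k : Nat, k % 3 = 0 →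
    (PySem.List.enumerate r (k : Int)).flatMap pvGB
      = (if k ≠ 0 ∧ r ≠ [] then ' ' :: pvGroup r else pvGroup r) := by
  intro n
  induction n with
  | zero =>
    intro r hr k h3
    have h0 : r = [] := List.length_eq_zero_iff.mp (Nat.le_zero.mp hr)
    subst h0
    simp [PySem.List.enumerate_nil, pvGroup_nil]
  | succ n ih =>
    intro r hr k h3
    have e1 : ((k : Int) + 1) = ((k + 1 : Nat) : Int) := by push_cast; ring
    have e2 : (((k + 1 : Nat) : Int) + 1) = ((k + 2 : Nat) : Int) := by push_cast; ring
    have e3 : (((k + 2 : Nat) : Int) + 1) = ((k + 3 : Nat) : Int) := by push_cast; ring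
    have h1 : (k + 1) % 3 ≠ 0 := by omega
    have h2 : (k + 2) % 3 ≠ 0 := by omega
    rcases r with _ | ⟨c1, _ | ⟨c2, _ | ⟨c3, _ | ⟨c4, rest⟩⟩⟩⟩
    · simp [PySem.List.enumerate_nil, pvGroup_nil]
    · simp only [PySem.List.enumerate_cons, PySem.List.enumerate_nil, List.flatMap_cons,
        List.flatMap_nil, List.append_nil, pvGB_head k c1 h3, pvGroup_one]
      split_ifs with hk hc <;> simp_all
    · simp only [PySem.List.enumerate_cons, PySem.List.enumerate_nil, e1, List.flatMap_cons,
        List.flatMap_nil, List.append_nil, pvGB_head k c1 h3, pvGB_single (k+1) c2 h1,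
        pvGroup_two]
      split_ifs with hk hc <;> simp_all
    · simp only [PySem.List.enumerate_cons, PySem.List.enumerate_nil, e1, e2, List.flatMap_cons,
        List.flatMap_nil, List.append_nil, pvGB_head k c1 h3, pvGB_single (k+1) c2 h1,
        pvGB_single (k+2) c3 h2, pvGroup_three]
      split_ifs with hk hc <;> simp_all
    · have hlen : (c4 :: rest).length ≤ n := by
        simp only [List.length_cons] at hr ⊢; omega
      have htail := ih (c4 :: rest) hlen (k + 3) (by omega)
      rw [if_pos ⟨by omega, by simp⟩] at htail
      simp only [PySem.List.enumerate_cons, e1, e2, e3, List.flatMap_cons,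
        pvGB_head k c1 h3, pvGB_single (k+1) c2 h1, pvGB_single (k+2) c3 h2,
        pvGroup_cons4]
      split_ifs with hk hc <;> simp_all [htail]

lemma pvJoinEmpty (L : List (List Char)) : PySem.Chars.join [] L = L.flatten := by
  induction L with
  | nil => simp [PySem.Chars.join_nil]
  | cons p L ih =>
    cases L with
    | nil => simp [PySem.Chars.join_singleton]
    | cons q rest =>
      rw [PySem.Chars.join_cons_cons]
      simp [ih]

lemma pvRevFlatten (S : List (List Char)) :
    S.reverse.flatten = ((S.map List.reverse).flatten).reverse := by
  rw [List.reverse_flatten]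
  simp [List.map_map]

-- B's chunk comprehension, joined with spaces, is exactly pvGroup
lemma pvChunks : ∀ (n : Nat) (s : List Char), s.length ≤ n →
    PySem.Chars.join [' ']
      ((PySem.List.pyRange 0 (PySem.List.len s) 3).map
        (fun i => PySem.List.slice s (some i) (some (i + 3))))
      = pvGroup s := by
  intro n
  induction n with
  | zero =>
    intro s hs
    have h0 : s = [] := List.length_eq_zero_iff.mp (Nat.le_zero.mp hs)
    subst h0
    simp [PySem.List.len, PySem.List.pyRange_of_pos 0 0 (by norm_num : (0:Int) < 3),
      PySem.Chars.join_nil, pvGroup_nil]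
  | succ n ih =>
    intro s hs
    rcases s with _ | ⟨c1, _ | ⟨c2, _ | ⟨c3, _ | ⟨c4, rest⟩⟩⟩⟩
    · simp [PySem.List.len, PySem.List.pyRange_of_pos 0 0 (by norm_num : (0:Int) < 3),
        PySem.Chars.join_nil, pvGroup_nil]
    · have h1 : PySem.List.pyRange 0 (PySem.List.len [c1]) 3 = [0] := by
        rw [show PySem.List.len [c1] = 1 from by simp [PySem.List.len]]
        decide
      rw [h1, List.map_cons, List.map_nil]
      rw [show PySem.List.slice [c1] (some 0) (some (0 + 3)) = [c1] from by
        rw [PySem.List.slice_zero_start, PySem.List.slice_to _ (by norm_num)]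
        rfl]
      rw [PySem.Chars.join_singleton, pvGroup_one]
    · have h1 : PySem.List.pyRange 0 (PySem.List.len [c1, c2]) 3 = [0] := by
        rw [show PySem.List.len [c1, c2] = 2 from by simp [PySem.List.len]]
        decide
      rw [h1, List.map_cons, List.map_nil]
      rw [show PySem.List.slice [c1, c2] (some 0) (some (0 + 3)) = [c1, c2] from by
        rw [PySem.List.slice_zero_start, PySem.List.slice_to _ (by norm_num)]
        rfl]
      rw [PySem.Chars.join_singleton, pvGroup_two]
    · have h1 : PySem.List.pyRange 0 (PySem.List.len [c1, c2, c3]) 3 = [0] := by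
        rw [show PySem.List.len [c1, c2, c3] = 3 from by simp [PySem.List.len]]
        decide
      rw [h1, List.map_cons, List.map_nil]
      rw [show PySem.List.slice [c1, c2, c3] (some 0) (some (0 + 3)) = [c1, c2, c3] from by
        rw [PySem.List.slice_zero_start, PySem.List.slice_to _ (by norm_num)]
        rfl]
      rw [PySem.Chars.join_singleton, pvGroup_three]
    · -- s = c1 :: c2 :: c3 :: c4 :: rest : peel the first chunk of three
      set t := c4 :: rest with ht
      have hlen : (c1 :: c2 :: c3 :: t).length = t.length + 3 := by simp
      have hlen' : t.length ≤ n := by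
        have := hs; simp [ht] at this ⊢; omega
      have hL : PySem.List.len (c1 :: c2 :: c3 :: t) = ((t.length + 3 : Nat) : Int) := by
        simp [PySem.List.len]
        omega
      have hm : ((((t.length + 3 : Nat) : Int) - 0 + 3 - 1) / 3).toNat = (t.length + 2) / 3 + 1 := by
        omega
      have hm' : PySem.List.pyRange 0 (PySem.List.len (c1 :: c2 :: c3 :: t)) 3
          = List.map (fun (k : Nat) => (0 : Int) + 3 * (k : Int)) (List.range ((t.length + 2) / 3 + 1)) := by
        rw [hL, PySem.List.pyRange_of_pos 0 _ (by norm_num : (0:Int) < 3)]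
        rw [if_pos (by positivity), hm]
      have hmt : PySem.List.pyRange 0 (PySem.List.len t) 3
          = List.map (fun (k : Nat) => (0 : Int) + 3 * (k : Int)) (List.range ((t.length + 2) / 3)) := by
        rw [show PySem.List.len t = ((t.length : Nat) : Int) by simp [PySem.List.len],
          PySem.List.pyRange_of_pos 0 _ (by norm_num : (0:Int) < 3)]
        rw [if_pos (by simp [ht]), show ((((t.length : Nat) : Int) - 0 + 3 - 1) / 3).toNat
          = (t.length + 2) / 3 from by omega]
      rw [hm', List.range_succ_eq_map, List.map_cons, List.map_cons, List.map_map, List.map_map]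
      have hfirst : PySem.List.slice (c1 :: c2 :: c3 :: t)
          (some ((0 : Int) + 3 * ((0 : Nat) : Int))) (some ((0 : Int) + 3 * ((0 : Nat) : Int) + 3))
          = [c1, c2, c3] := by
        rw [show ((0 : Int) + 3 * ((0 : Nat) : Int)) = 0 from by norm_num]
        rw [PySem.List.slice_zero_start, PySem.List.slice_to _ (by norm_num)]
        rfl
      have hshift : ∀ k : Nat,
          PySem.List.slice (c1 :: c2 :: c3 :: t)
            (some ((0 : Int) + 3 * ((Nat.succ k : Nat) : Int))) (some ((0 : Int) + 3 * ((Nat.succ k : Nat) : Int) + 3))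
          = PySem.List.slice t (some ((0 : Int) + 3 * ((k : Nat) : Int))) (some ((0 : Int) + 3 * ((k : Nat) : Int) + 3)) := by
        intro k
        rw [show ((0 : Int) + 3 * ((Nat.succ k : Nat) : Int)) = (((3 * k + 3 : Nat) : Int)) from by push_cast; ring,
          show (((3 * k + 3 : Nat) : Int) + 3) = (((3 * k + 6 : Nat) : Int)) from by push_cast; ring,
          show ((0 : Int) + 3 * ((k : Nat) : Int)) = (((3 * k : Nat) : Int)) from by push_cast; ring,
          show (((3 * k : Nat) : Int) + 3) = (((3 * k + 3 : Nat) : Int)) from by push_cast; ring,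
          PySem.List.slice_natCast, PySem.List.slice_natCast]
        rw [show 3 * k + 6 - (3 * k + 3) = 3 from by omega,
          show 3 * k + 3 - 3 * k = 3 from by omega]
        rfl
      have htailmap : List.map
            (((fun i => PySem.List.slice (c1 :: c2 :: c3 :: t) (some i) (some (i + 3)))
              ∘ fun (k : Nat) => (0 : Int) + 3 * (k : Int)) ∘ Nat.succ)
            (List.range ((t.length + 2) / 3))
          = (PySem.List.pyRange 0 (PySem.List.len t) 3).map
              (fun i => PySem.List.slice t (some i) (some (i + 3))) := by
        rw [hmt, List.map_map]
        apply List.map_congr_left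
        intro k _
        exact hshift k
      rw [hfirst, htailmap]
      have hnil : (PySem.List.pyRange 0 (PySem.List.len t) 3).map
          (fun i => PySem.List.slice t (some i) (some (i + 3))) ≠ [] := by
        rw [hmt]
        simp [ht]
      have htail := ih t hlen'
      cases hq : (PySem.List.pyRange 0 (PySem.List.len t) 3).map
          (fun i => PySem.List.slice t (some i) (some (i + 3))) with
      | nil => exact absurd hq hnil
      | cons q qs =>
        rw [hq] at htail
        rw [PySem.Chars.join_cons_cons, htail]
        simp [ht, pvGroup_cons4]

-- ===== VERDICT (by name: the statement is the Claim_ definition above) =====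
theorem prepare_expected_value_spec : Claim_equal_prepare_expected_value := by
  intro number op _
  unfold Spec_prepare_expected_value prepare_expected_value prepare_expected_value_alt
  by_cases hop : (op == "divide" || op == "/") = true
  · simp [hop]
  · simp only [hop, Bool.false_eq_true, if_false]
    set r := number.toList.reverse with hr
    have h0 : (PySem.List.enumerate r : List (Int × Char)) = PySem.List.enumerate r ((0 : Nat) : Int) := by
      norm_num
    rw [h0, pvFoldl_map r 0 [] rfl, List.nil_append]
    apply String.toList_inj.mp
    rw [PySem.Str.toList_join]
    have hsep : ("" : String).toList = ([] : List Char) := rfl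
    rw [hsep, pvJoinEmpty, String.toList_ofList, pvChunks r.length r le_rfl]
    rw [List.map_reverse, pvRevFlatten]
    congr 1
    rw [List.map_map, List.map_map]
    have hmap : (List.map ((List.reverse ∘ String.toList) ∘ pvFA) (PySem.List.enumerate r ((0:Nat):Int)))
        = List.map pvGB (PySem.List.enumerate r ((0:Nat):Int)) := by
      apply List.map_congr_left
      intro iv _
      exact pvFA_rev iv
    rw [hmap, ← List.flatMap_def, pvCore r.length r le_rfl 0 rfl]
    simp
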